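-- pv_equiv track=rewrite | github.com/OTOYO1020/ChatDev_Intermediate | WareHouse/ED_130__20250518083602/subsequence.py | count_subsequence_pairs
-- ===== SOURCE A (Python) =====
-- from collections import defaultdict
-- from typing import List, Dict
--
-- MOD = 10**9 + 7
--
-- def subsequence_count(sequence: List[int]) -> Dict[int, int]:
--     '''
--     Count occurrences of each integer in the subsequence and return their counts.
--     '''
--     count = defaultdict(int)
--     for num in sequence:
--         count[num] += 1
--     return count
--
-- def count_subsequence_pairs(S: List[int], T: List[int]) -> int:
--     '''
--     Count the number of valid subsequence pairs from sequences S and T.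
--     '''
--     count_S = subsequence_count(S)
--     count_T = subsequence_count(T)
--     total_pairs = 0
--     for num in count_S:
--         if num in count_T:
--             # Calculate the number of distinct non-empty subsequences
--             subseq_count_S = (pow(2, count_S[num], MOD) - 1) % MOD  # Non-empty subsequences from S
--             subseq_count_T = (pow(2, count_T[num], MOD) - 1) % MOD  # Non-empty subsequences from T
--             # Multiply the counts of non-empty subsequences
--             total_pairs += (subseq_count_S * subseq_count_T) % MOD
--             total_pairs %= MOD
--             # Ensure to account for distinct subsequences formed by indices
--             # This part is already handled by the way we count subsequences above.
--     return total_pairs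
-- ===== SOURCE B (Python) =====
-- MOD = 10**9 + 7
--
-- def _runs(xs):
--     """Run-length encode sorted(xs) as a list of (value, count) pairs, values increasing."""
--     runs = []
--     for x in sorted(xs):
--         if runs and runs[-1][0] == x:
--             runs[-1] = (x, runs[-1][1] + 1)
--         else:
--             runs.append((x, 1))
--     return runs
--
-- def count_subsequence_pairs(S, T):
--     rs = _runs(S)
--     rt = _runs(T)
--     total = 0
--     i = 0
--     j = 0
--     while i < len(rs) and j < len(rt):
--         v, cs = rs[i]
--         w, ct = rt[j]
--         if v < w:
--             i += 1
--         elif w < v: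
--             j += 1
--         else:
--             a = (pow(2, cs, MOD) - 1) % MOD
--             b = (pow(2, ct, MOD) - 1) % MOD
--             total = (total + (a * b) % MOD) % MOD
--             i += 1
--             j += 1
--     return total
-- ===== Notes on version B (the rewrite author's own statement) =====
-- stated objective: alternative
-- what changed: B replaces A's two hashed frequency dictionaries and dict-membership loop by run-length encoding the two sorted lists and a two-pointer merge over the (value, count) runs, accumulating the same mod-reduced sum over common values.
import Mathlib
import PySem

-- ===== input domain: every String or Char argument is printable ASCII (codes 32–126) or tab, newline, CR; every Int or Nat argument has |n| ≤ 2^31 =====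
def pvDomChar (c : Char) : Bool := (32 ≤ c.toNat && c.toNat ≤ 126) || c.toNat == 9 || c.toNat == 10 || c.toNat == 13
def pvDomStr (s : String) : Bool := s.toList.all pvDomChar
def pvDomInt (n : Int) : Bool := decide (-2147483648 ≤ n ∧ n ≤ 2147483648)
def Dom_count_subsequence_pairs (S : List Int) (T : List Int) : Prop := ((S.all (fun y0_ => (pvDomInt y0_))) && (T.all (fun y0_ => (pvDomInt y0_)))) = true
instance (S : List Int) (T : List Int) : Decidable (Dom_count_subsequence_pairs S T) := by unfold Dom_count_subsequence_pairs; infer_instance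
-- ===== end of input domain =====

-- B replaces A's two hashed frequency dicts and key-membership loop by run-length encoding
-- the two sorted lists and a two-pointer merge over the runs; objective: alternative algorithm.

def MOD : Int := 1000000007

-- ===== PORT A =====
def subsequence_count (sequence : List Int) : PySem.Dict Int Int :=
  sequence.foldl (fun count num => count.modify num 0 (· + 1)) PySem.Dict.empty

def count_subsequence_pairs (S : List Int) (T : List Int) : Int :=
  let count_S := subsequence_count S
  let count_T := subsequence_count T
  count_S.keys.foldl (fun total_pairs num =>
    if count_T.contains num then
      let subseq_count_S := PySem.Int.mod (PySem.Int.powMod 2 (count_S.getD num 0).toNat MOD - 1) MOD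
      let subseq_count_T := PySem.Int.mod (PySem.Int.powMod 2 (count_T.getD num 0).toNat MOD - 1) MOD
      PySem.Int.mod (total_pairs + PySem.Int.mod (subseq_count_S * subseq_count_T) MOD) MOD
    else total_pairs) 0

-- ===== PORT B =====
-- one step of _runs' loop body ('if runs and runs[-1][0] == x' = match on the last element)
def pyRunsStep (runs : List (Int × Int)) (x : Int) : List (Int × Int) :=
  match runs.getLast? with
  | some last => if last.1 == x then runs.dropLast ++ [(x, last.2 + 1)] else runs ++ [(x, 1)]
  | none => runs ++ [(x, 1)]

def pyRuns (xs : List Int) : List (Int × Int) :=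
  (PySem.List.sorted xs (fun x => x) false).foldl pyRunsStep []

-- the while loop over indices i, j: recursion on the two run suffixes
def pyMerge : List (Int × Int) → List (Int × Int) → Int → Int
  | [], _, total => total
  | _ :: _, [], total => total
  | (v, cs) :: rs, (w, ct) :: rt, total =>
    if v < w then pyMerge rs ((w, ct) :: rt) total
    else if w < v then pyMerge ((v, cs) :: rs) rt total
    else
      pyMerge rs rt (PySem.Int.mod (total +
        PySem.Int.mod (PySem.Int.mod (PySem.Int.powMod 2 cs.toNat MOD - 1) MOD *
          PySem.Int.mod (PySem.Int.powMod 2 ct.toNat MOD - 1) MOD) MOD) MOD)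
  termination_by rs rt _ => rs.length + rt.length

def count_subsequence_pairs_alt (S : List Int) (T : List Int) : Int :=
  pyMerge (pyRuns S) (pyRuns T) 0

-- ===== PRECONDITION & SPEC =====
def Spec_count_subsequence_pairs (S : List Int) (T : List Int) (out : Int) : Prop := out = count_subsequence_pairs_alt S T
instance (S : List Int) (T : List Int) (out : Int) : Decidable (Spec_count_subsequence_pairs S T out) := by unfold Spec_count_subsequence_pairs; infer_instance

-- ===== CLAIM (what is proved, stated in full; the proofs are below) =====
def Claim_equal_count_subsequence_pairs : Prop := ∀ (S : List Int) (T : List Int), Dom_count_subsequence_pairs S T → Spec_count_subsequence_pairs S T (count_subsequence_pairs S T)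

-- ===== LEMMAS AND PROOFS =====

-- the per-common-value summand both programs add
def pvTerm (S T : List Int) (num : Int) : Int :=
  ((PySem.Int.powMod 2 (List.count num S) MOD - 1) % MOD *
   ((PySem.Int.powMod 2 (List.count num T) MOD - 1) % MOD)) % MOD

-- the same summand as pyMerge computes it from stored Int counts
def pvTermFG (f g : Int → Int) (v : Int) : Int :=
  ((PySem.Int.powMod 2 (f v).toNat MOD - 1) % MOD *
   ((PySem.Int.powMod 2 (g v).toNat MOD - 1) % MOD)) % MOD

-- A's loop: a running mod-reduced sum of the terms of the kept elements
lemma foldl_mod_sum_if (t : Int → Int) (p : Int → Bool) :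
    ∀ (l : List Int) (a : Int),
      l.foldl (fun tot x => if p x then (tot + t x) % MOD else tot) (a % MOD)
        = (a + ((l.filter p).map t).sum) % MOD := by
  intro l
  induction l with
  | nil => intro a; simp
  | cons x l ih =>
    intro a
    simp only [List.foldl_cons, List.filter_cons]
    by_cases h : p x
    · rw [if_pos h, Int.emod_add_emod, ih (a + t x)]
      simp [h, add_assoc]
    · rw [if_neg h]
      simp only [h, Bool.false_eq_true, if_false]
      exact ih a

lemma A_eq_sum (S T : List Int) :
    count_subsequence_pairs S T
      = (((PySem.Set.ofList S).filter (fun x => T.contains x)).map (pvTerm S T)).sum % MOD := by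
  have hmod : ∀ a : Int, PySem.Int.mod a MOD = a % MOD := fun a =>
    PySem.Int.mod_eq_emod_of_pos (by decide)
  have hc : subsequence_count S = PySem.Dict.counter S := rfl
  have hcT : subsequence_count T = PySem.Dict.counter T := rfl
  unfold count_subsequence_pairs
  simp only [hc, hcT, PySem.Dict.keys_counter, PySem.Dict.contains_counter,
    PySem.Dict.getD_counter, Int.toNat_natCast, hmod]
  have := foldl_mod_sum_if (pvTerm S T) (fun x => T.contains x) (PySem.Set.ofList S) 0
  simpa [pvTerm] using this

lemma ofList_snoc (ys : List Int) (y : Int) :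
    PySem.Set.ofList (ys ++ [y]) = if y ∈ ys then PySem.Set.ofList ys else PySem.Set.ofList ys ++ [y] := by
  rw [PySem.Set.ofList_eq_foldl, List.foldl_append]
  rw [← PySem.Set.ofList_eq_foldl]
  simp only [List.foldl_cons, List.foldl_nil, PySem.Set.add]
  by_cases h : y ∈ ys
  · simp [PySem.Set.contains, List.contains_eq_mem, PySem.Set.mem_ofList, h]
  · simp [PySem.Set.contains, List.contains_eq_mem, PySem.Set.mem_ofList, h]

lemma ofList_sublist (ys : List Int) : (PySem.Set.ofList ys).Sublist ys := by
  induction ys using List.reverseRecOn with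
  | nil => simp
  | append_singleton ys y ih =>
    rw [ofList_snoc]
    by_cases h : y ∈ ys
    · simp only [h, if_true]
      exact ih.trans (List.sublist_append_left ys [y])
    · simp only [h, if_false]
      exact List.Sublist.append ih (List.Sublist.refl _)

lemma ofList_pairwise_lt (ys : List Int) (h : ys.Pairwise (· ≤ ·)) :
    (PySem.Set.ofList ys).Pairwise (· < ·) := by
  have h1 : (PySem.Set.ofList ys).Pairwise (· ≤ ·) := List.Pairwise.sublist (ofList_sublist ys) h
  have h2 : (PySem.Set.ofList ys).Nodup := PySem.Set.nodup_ofList ys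
  exact (h1.and h2).imp (fun hab => lt_of_le_of_ne hab.1 hab.2)

-- _runs on a sorted list: one (value, multiplicity) pair per distinct value, in first-occurrence order
lemma runsFold_sorted (ys : List Int) (h : ys.Pairwise (· ≤ ·)) :
    ys.foldl pyRunsStep [] = (PySem.Set.ofList ys).map (fun v => (v, (ys.count v : Int))) := by
  induction ys using List.reverseRecOn with
  | nil => simp
  | append_singleton ys y ih =>
    have hsorted : ys.Pairwise (· ≤ ·) := List.Pairwise.sublist (List.sublist_append_left ys [y]) h
    have hle : ∀ x ∈ ys, x ≤ y := fun x hx => (List.pairwise_append.mp h).2.2 x hx y (by simp)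
    have hcnt : ∀ v : Int, (ys ++ [y]).count v = ys.count v + if v = y then 1 else 0 := by
      intro v
      rw [List.count_append]
      by_cases hv : v = y
      · simp [hv]
      · have : ¬ (y = v) := fun e => hv e.symm
        simp [hv, this]
    rw [List.foldl_append, List.foldl_cons, List.foldl_nil, ih hsorted, ofList_snoc]
    rcases List.eq_nil_or_concat (PySem.Set.ofList ys) with hL | ⟨l', a, hL⟩
    all_goals (try rw [List.concat_eq_append] at hL)
    · have hys : ys = [] := by
        by_contra hne
        rcases List.exists_mem_of_ne_nil ys hne with ⟨x, hx⟩
        have : x ∈ PySem.Set.ofList ys := (PySem.Set.mem_ofList ys x).mpr hx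
        simp [hL] at this
      subst hys
      simp [pyRunsStep]
    · have hlt := ofList_pairwise_lt ys hsorted
      have hmemL : ∀ v ∈ l', v ∈ ys := by
        intro v hv
        exact (PySem.Set.mem_ofList ys v).mp (by rw [hL]; exact List.mem_append_left _ hv)
      have haym : a ∈ ys := (PySem.Set.mem_ofList ys a).mp (by rw [hL]; simp)
      have hvlta : ∀ v ∈ l', v < a := by
        intro v hv
        have := hlt
        rw [hL] at this
        exact (List.pairwise_append.mp this).2.2 v hv a (by simp)
      by_cases hmem : y ∈ ys
      · simp only [hmem, if_true]
        have hay : a = y := by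
          have h1 : a ≤ y := hle a haym
          have hyL : y ∈ PySem.Set.ofList ys := (PySem.Set.mem_ofList ys y).mpr hmem
          rw [hL] at hyL
          rcases List.mem_append.mp hyL with hy | hy
          · have := hvlta y hy; omega
          · simp at hy; omega
        subst hay
        rw [hL]
        simp only [List.map_append, List.map_cons, List.map_nil]
        unfold pyRunsStep
        rw [List.getLast?_concat]
        simp only [BEq.rfl, if_true, List.dropLast_concat]
        have hfeq : ∀ v ∈ l', (fun v => ((v : Int), ((ys ++ [a]).count v : Int))) v
            = (fun v => (v, (ys.count v : Int))) v := by
          intro v hv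
          have hlt' := hvlta v hv
          have hva : ¬ v = a := by omega
          simp [hcnt v, hva]
        rw [List.map_congr_left hfeq]
        simp [hcnt a]
      · simp only [hmem, if_false]
        rw [hL]
        simp only [List.map_append, List.map_cons, List.map_nil]
        unfold pyRunsStep
        rw [List.getLast?_concat]
        have hay : ¬ (a = y) := fun e => hmem (e ▸ haym)
        simp only [beq_iff_eq, hay, if_false]
        have hfeq : ∀ v ∈ l', (fun v => ((v : Int), ((ys ++ [y]).count v : Int))) v
            = (fun v => (v, (ys.count v : Int))) v := by
          intro v hv
          have hvy : ¬ v = y := fun e => hmem (e ▸ hmemL v hv)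
          simp [hcnt v, hvy]
        have hcy : ys.count y = 0 := List.count_eq_zero.mpr hmem
        rw [List.map_congr_left hfeq]
        simp [hcnt a, hay, hcnt y, hcy]

-- the two-pointer merge over strictly increasing run lists is the mod-reduced sum over common values
lemma merge_eq (f g : Int → Int) :
    ∀ (ds es : List Int) (a : Int), ds.Pairwise (· < ·) → es.Pairwise (· < ·) →
      pyMerge (ds.map fun v => (v, f v)) (es.map fun v => (v, g v)) (a % MOD)
        = (a + ((ds.filter (fun v => decide (v ∈ es))).map (pvTermFG f g)).sum) % MOD := by
  have hmod : ∀ x : Int, PySem.Int.mod x MOD = x % MOD := fun x =>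
    PySem.Int.mod_eq_emod_of_pos (by decide)
  intro ds
  induction ds with
  | nil => intro es a _ _; simp [pyMerge]
  | cons v ds ihd =>
    intro es
    induction es with
    | nil => intro a _ _; simp [pyMerge]
    | cons w es ihe =>
      intro a hd he
      have hd' : ds.Pairwise (· < ·) := hd.of_cons
      have he' : es.Pairwise (· < ·) := he.of_cons
      simp only [List.map_cons, pyMerge, hmod]
      by_cases hvw : v < w
      · rw [if_pos hvw]
        have : (v :: ds).filter (fun x => decide (x ∈ w :: es)) = ds.filter (fun x => decide (x ∈ w :: es)) := by
          rw [List.filter_cons]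
          have hnv : v ∉ w :: es := by
            intro hmem
            rcases List.mem_cons.mp hmem with h' | h'
            · omega
            · have := List.rel_of_pairwise_cons he h'; omega
          simp [hnv]
        rw [this]
        exact ihd (w :: es) a hd' he
      · rw [if_neg hvw]
        by_cases hwv : w < v
        · rw [if_pos hwv]
          have : (v :: ds).filter (fun x => decide (x ∈ w :: es)) = (v :: ds).filter (fun x => decide (x ∈ es)) := by
            apply List.filter_congr
            intro x hx
            have hxw : x ≠ w := by
              rcases List.mem_cons.mp hx with h' | h'
              · omega
              · have := List.rel_of_pairwise_cons hd h'; omega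
            simp [List.mem_cons, hxw]
          rw [this]
          exact ihe a hd he'
        · rw [if_neg hwv]
          have hvw' : v = w := by omega
          subst hvw'
          have hstep : ((a % MOD) + ((PySem.Int.powMod 2 (f v).toNat MOD - 1) % MOD *
              ((PySem.Int.powMod 2 (g v).toNat MOD - 1) % MOD)) % MOD) % MOD
              = (a + pvTermFG f g v) % MOD := by
            rw [Int.emod_add_emod]; rfl
          rw [hstep, ihd es (a + pvTermFG f g v) hd' he']
          have : (v :: ds).filter (fun x => decide (x ∈ v :: es)) = v :: ds.filter (fun x => decide (x ∈ es)) := by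
            rw [List.filter_cons]
            simp only [List.mem_cons, true_or, decide_true, if_true]
            congr 1
            apply List.filter_congr
            intro x hx
            have hxv : x ≠ v := by have := List.rel_of_pairwise_cons hd hx; omega
            simp [hxv]
          rw [this]
          simp [add_assoc]

lemma B_eq_sum (S T : List Int) :
    count_subsequence_pairs_alt S T
      = (((PySem.Set.ofList (PySem.List.sorted S (fun x => x) false)).filter
            (fun v => decide (v ∈ PySem.Set.ofList (PySem.List.sorted T (fun x => x) false)))).map
          (pvTerm S T)).sum % MOD := by
  have hrS : pyRuns S = (PySem.Set.ofList (PySem.List.sorted S (fun x => x) false)).map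
      (fun v => (v, ((List.count v S : Nat) : Int))) := by
    unfold pyRuns
    rw [runsFold_sorted _ (PySem.List.sorted_pairwise S (fun x => x))]
    refine List.map_congr_left (fun v _ => ?_)
    rw [List.Perm.count_eq (PySem.List.sorted_perm S (fun x => x) false)]
  have hrT : pyRuns T = (PySem.Set.ofList (PySem.List.sorted T (fun x => x) false)).map
      (fun v => (v, ((List.count v T : Nat) : Int))) := by
    unfold pyRuns
    rw [runsFold_sorted _ (PySem.List.sorted_pairwise T (fun x => x))]
    refine List.map_congr_left (fun v _ => ?_)
    rw [List.Perm.count_eq (PySem.List.sorted_perm T (fun x => x) false)]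
  unfold count_subsequence_pairs_alt
  rw [hrS, hrT]
  have h0 : (0 : Int) = 0 % MOD := by decide
  rw [h0, merge_eq _ _ _ _ 0
    (ofList_pairwise_lt _ (PySem.List.sorted_pairwise S (fun x => x)))
    (ofList_pairwise_lt _ (PySem.List.sorted_pairwise T (fun x => x)))]
  have hterm : pvTermFG (fun v => ((List.count v S : Nat) : Int))
      (fun v => ((List.count v T : Nat) : Int)) = pvTerm S T := by
    funext v
    simp [pvTermFG, pvTerm]
  rw [hterm]
  simp

-- ===== VERDICT (by name: the statement is the Claim_ definition above) =====
theorem count_subsequence_pairs_spec : Claim_equal_count_subsequence_pairs := by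
  intro S T _
  unfold Spec_count_subsequence_pairs
  rw [A_eq_sum, B_eq_sum]
  have hpred : ∀ x : Int,
      (decide (x ∈ PySem.Set.ofList (PySem.List.sorted T (fun x => x) false))) = T.contains x := by
    intro x
    rw [List.contains_eq_mem]
    simp [PySem.Set.mem_ofList, PySem.List.mem_sorted]
  have hperm : ((PySem.Set.ofList (PySem.List.sorted S (fun x => x) false)).filter
        (fun v => decide (v ∈ PySem.Set.ofList (PySem.List.sorted T (fun x => x) false)))).Perm
      ((PySem.Set.ofList S).filter (fun x => T.contains x)) := by
    have hp : (PySem.Set.ofList (PySem.List.sorted S (fun x => x) false)).Perm (PySem.Set.ofList S) := by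
      rw [List.perm_ext_iff_of_nodup (PySem.Set.nodup_ofList _) (PySem.Set.nodup_ofList _)]
      intro x
      simp [PySem.Set.mem_ofList, PySem.List.mem_sorted]
    have := hp.filter (fun x => T.contains x)
    have hfe : (PySem.Set.ofList (PySem.List.sorted S (fun x => x) false)).filter
        (fun v => decide (v ∈ PySem.Set.ofList (PySem.List.sorted T (fun x => x) false)))
        = (PySem.Set.ofList (PySem.List.sorted S (fun x => x) false)).filter (fun x => T.contains x) := by
      exact List.filter_congr (fun x _ => hpred x)
    rw [hfe]
    exact this
  rw [(hperm.map (pvTerm S T)).sum_eq]
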